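-- pv_equiv track=rewrite | github.com/dimozino/4-solvents | merge_itp.py | count_atoms_in_block
-- ===== SOURCE A (Python) =====
-- def count_atoms_in_block(block_lines):
--     """Count number of atoms in [ atoms ] section of given block."""
--     n = 0
--     in_atoms = False
--     for ln in block_lines:
--         stripped = ln.strip()
--         if stripped.lower().startswith("[ atoms ]"):
--             in_atoms = True
--             continue
--         if in_atoms and stripped.startswith("[") and "]" in stripped and not stripped.lower().startswith("[ atoms ]"):
--             break
--         if in_atoms:
--             if stripped == "" or stripped.startswith(";"):
--                 continue
--             parts = stripped.split()
--             try:
--                 int(parts[0])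
--                 n += 1
--             except (ValueError, IndexError):
--                 pass
--     return n
-- ===== SOURCE B (Python) =====
-- def _classify(ln):
--     """Map one line to a one-letter tag: H = atoms header, S = other section
--     header, A = atom line (first token is an int), O = anything else."""
--     s = ln.strip()
--     if s.lower().startswith("[ atoms ]"):
--         return "H"
--     if s.startswith("[") and "]" in s:
--         return "S"
--     if s and not s.startswith(";"):
--         try:
--             int(s.split()[0])
--             return "A"
--         except ValueError:
--             pass
--     return "O"
--
--
-- def count_atoms_in_block(block_lines):
--     """Count number of atoms in [ atoms ] section of given block."""
--     # classify every line once, then answer with pure index/count arithmetic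
--     tags = [_classify(ln) for ln in block_lines]
--     try:
--         h = tags.index("H")
--     except ValueError:
--         return 0
--     rest = tags[h + 1:]
--     body = rest[:rest.index("S")] if "S" in rest else rest
--     return body.count("A")
-- ===== Notes on version B (the rewrite author's own statement) =====
-- stated objective: alternative
-- what changed: B replaces A's single stateful scan with an in_atoms flag by a map-then-query pipeline: every line is first classified once into a one-letter tag (H/S/A/O), and the answer is then computed purely on the tag list with index, slicing and count - no counting loop or flag state at all.
import Mathlib
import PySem

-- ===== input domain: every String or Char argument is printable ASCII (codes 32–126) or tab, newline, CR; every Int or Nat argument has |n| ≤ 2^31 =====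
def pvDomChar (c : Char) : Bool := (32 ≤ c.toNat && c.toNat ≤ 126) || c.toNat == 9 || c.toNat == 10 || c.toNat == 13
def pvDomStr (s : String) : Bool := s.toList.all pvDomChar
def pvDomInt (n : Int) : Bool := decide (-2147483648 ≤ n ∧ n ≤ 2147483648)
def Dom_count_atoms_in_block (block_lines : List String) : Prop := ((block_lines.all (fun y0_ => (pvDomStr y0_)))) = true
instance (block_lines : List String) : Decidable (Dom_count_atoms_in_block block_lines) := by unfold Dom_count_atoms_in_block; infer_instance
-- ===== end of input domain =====

-- B replaces A's single stateful scan (in_atoms flag) by a map-then-query pipeline: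
-- classify every line once into a tag (H/S/A/O), then answer by index/slice/count
-- on the tag list; same linear cost, no loop state.

-- ===== PORT A =====
-- the for-loop of A: state (n, in_atoms); returning n early models `break`
def pvLoopA : List String → Int → Bool → Int
  | [], n, _ => n
  | ln :: rest, n, inAtoms =>
    let stripped := PySem.Str.strip ln
    if PySem.Str.startswith (PySem.Str.lower stripped) "[ atoms ]" then
      pvLoopA rest n true
    else if inAtoms && PySem.Str.startswith stripped "[" && PySem.Str.isIn "]" stripped
            && !(PySem.Str.startswith (PySem.Str.lower stripped) "[ atoms ]") then
      n
    else if inAtoms then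
      if stripped == "" || PySem.Str.startswith stripped ";" then
        pvLoopA rest n inAtoms
      else
        -- parts = stripped.split(); try: int(parts[0]); n += 1; except: pass
        match PySem.List.pyGet? (PySem.Str.split₀ stripped) 0 with
        | none => pvLoopA rest n inAtoms
        | some p0 =>
          match PySem.Int.ofStr? p0 with
          | some _ => pvLoopA rest (n + 1) inAtoms
          | none => pvLoopA rest n inAtoms
    else pvLoopA rest n inAtoms

def count_atoms_in_block (block_lines : List String) : Int :=
  pvLoopA block_lines 0 false

-- ===== PORT B =====
-- _classify: one line -> one tag character ('H' atoms header, 'S' other section, 'A' atom line, 'O' other)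
def pvClassifyB (ln : String) : Char :=
  let s := PySem.Str.strip ln
  if PySem.Str.startswith (PySem.Str.lower s) "[ atoms ]" then 'H'
  else if PySem.Str.startswith s "[" && PySem.Str.isIn "]" s then 'S'
  else if !(s == "" || PySem.Str.startswith s ";") then
    -- try: int(s.split()[0]); return "A"; except ValueError: pass
    match PySem.List.pyGet? (PySem.Str.split₀ s) 0 with
    | some p0 => if (PySem.Int.ofStr? p0).isSome then 'A' else 'O'
    | none => 'O'
  else 'O'

def count_atoms_in_block_alt (block_lines : List String) : Int :=
  let tags := block_lines.map pvClassifyB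
  -- try: h = tags.index("H") except ValueError: return 0
  match PySem.List.index? tags 'H' with
  | none => 0
  | some h =>
    let rest := PySem.List.slice tags (some ((h : Int) + 1)) none
    -- body = rest[:rest.index("S")] if "S" in rest else rest   ('S' ∈ rest ↔ index? = some; Option.elim is that conditional)
    let body := (PySem.List.index? rest 'S').elim rest
        (fun e => PySem.List.slice rest none (some (e : Int)))
    ((PySem.List.count body 'A' : Nat) : Int)

-- ===== PRECONDITION & SPEC =====
def Spec_count_atoms_in_block (block_lines : List String) (out : Int) : Prop := out = count_atoms_in_block_alt block_lines
instance (block_lines : List String) (out : Int) : Decidable (Spec_count_atoms_in_block block_lines out) := by unfold Spec_count_atoms_in_block; infer_instance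

-- ===== CLAIM (what is proved, stated in full; the proofs are below) =====
def Claim_equal_count_atoms_in_block : Prop := ∀ (block_lines : List String), Dom_count_atoms_in_block block_lines → Spec_count_atoms_in_block block_lines (count_atoms_in_block block_lines)

-- ===== LEMMAS AND PROOFS =====

-- proof-side reading of B's phase 2: count 'A's until the first 'S'
def pvCountS : List Char → Int
  | [] => 0
  | c :: ts => if c = 'S' then 0 else (if c = 'A' then 1 else 0) + pvCountS ts

-- the classification cases of pvClassifyB, one lemma per branch
theorem pvClassifyB_H (ln : String)
    (h1 : PySem.Str.startswith (PySem.Str.lower (PySem.Str.strip ln)) "[ atoms ]" = true) :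
    pvClassifyB ln = 'H' := by
  simp only [pvClassifyB]
  rw [if_pos h1]

theorem pvClassifyB_S (ln : String)
    (h1 : PySem.Str.startswith (PySem.Str.lower (PySem.Str.strip ln)) "[ atoms ]" = false)
    (h2 : (PySem.Str.startswith (PySem.Str.strip ln) "[" && PySem.Str.isIn "]" (PySem.Str.strip ln)) = true) :
    pvClassifyB ln = 'S' := by
  simp only [pvClassifyB]
  rw [if_neg (by rw [h1]; simp), if_pos h2]

theorem pvClassifyB_O_skip (ln : String)
    (h1 : PySem.Str.startswith (PySem.Str.lower (PySem.Str.strip ln)) "[ atoms ]" = false)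
    (h2 : (PySem.Str.startswith (PySem.Str.strip ln) "[" && PySem.Str.isIn "]" (PySem.Str.strip ln)) = false)
    (h3 : (PySem.Str.strip ln == "" || PySem.Str.startswith (PySem.Str.strip ln) ";") = true) :
    pvClassifyB ln = 'O' := by
  simp only [pvClassifyB]
  rw [if_neg (by rw [h1]; simp), if_neg (by rw [h2]; simp), if_neg (by rw [h3]; simp)]

theorem pvClassifyB_tok (ln : String) (c : Char)
    (h1 : PySem.Str.startswith (PySem.Str.lower (PySem.Str.strip ln)) "[ atoms ]" = false)
    (h2 : (PySem.Str.startswith (PySem.Str.strip ln) "[" && PySem.Str.isIn "]" (PySem.Str.strip ln)) = false)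
    (h3 : (PySem.Str.strip ln == "" || PySem.Str.startswith (PySem.Str.strip ln) ";") = false)
    (hres : ((PySem.List.pyGet? (PySem.Str.split₀ (PySem.Str.strip ln)) 0).elim 'O'
              (fun p0 => if (PySem.Int.ofStr? p0).isSome then 'A' else 'O')) = c) :
    pvClassifyB ln = c := by
  simp only [pvClassifyB]
  rw [if_neg (by rw [h1]; simp), if_neg (by rw [h2]; simp), if_pos (by rw [h3]; decide)]
  rw [← hres]
  cases PySem.List.pyGet? (PySem.Str.split₀ (PySem.Str.strip ln)) 0 <;> rfl

-- B's index/slice/count query on a tag list computes pvCountS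
theorem pvBody_eq (rest : List Char) :
    ((PySem.List.count ((PySem.List.index? rest 'S').elim rest
        (fun e => PySem.List.slice rest none (some (e : Int)))) 'A' : Nat) : Int) = pvCountS rest := by
  induction rest with
  | nil => simp [PySem.List.index?_eq_idxOf?, pvCountS, PySem.List.count_eq]
  | cons c ts ih =>
    by_cases hc : c = 'S'
    · subst hc
      rw [PySem.List.index?_cons_self]
      simp only [Option.elim_some]
      rw [PySem.List.slice_to_natCast ('S' :: ts) 0]
      simp [pvCountS, PySem.List.count_eq]
    · rw [PySem.List.index?_cons_of_ne ts hc]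
      cases hi : PySem.List.index? ts 'S' with
      | none =>
        rw [hi] at ih
        simp only [Option.map_none, Option.elim_none] at ih ⊢
        rw [pvCountS, if_neg hc, ← ih]
        rw [PySem.List.count_eq, PySem.List.count_eq, List.count_cons]
        by_cases hA : c = 'A'
        · rw [if_pos (beq_iff_eq.mpr hA), if_pos hA]; push_cast; ring
        · rw [if_neg (fun hb => hA (beq_iff_eq.mp hb)), if_neg hA]; push_cast; ring
      | some e =>
        rw [hi] at ih
        simp only [Option.map_some, Option.elim_some] at ih ⊢
        rw [PySem.List.slice_to_natCast ts e] at ih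
        rw [PySem.List.slice_to_natCast (c :: ts) (e + 1), List.take_succ_cons]
        rw [pvCountS, if_neg hc, ← ih]
        rw [PySem.List.count_eq, PySem.List.count_eq, List.count_cons]
        by_cases hA : c = 'A'
        · rw [if_pos (beq_iff_eq.mpr hA), if_pos hA]; push_cast; ring
        · rw [if_neg (fun hb => hA (beq_iff_eq.mp hb)), if_neg hA]; push_cast; ring
  
-- once in_atoms is set, A's loop adds pvCountS of the tags of the remaining lines
theorem pvLoopA_true (l : List String) : ∀ n : Int,
    pvLoopA l n true = n + pvCountS (l.map pvClassifyB) := by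
  induction l with
  | nil => intro n; simp [pvLoopA, pvCountS]
  | cons ln rest ih =>
    intro n
    rw [List.map_cons]
    simp only [pvLoopA, Bool.true_and]
    by_cases h1 : PySem.Str.startswith (PySem.Str.lower (PySem.Str.strip ln)) "[ atoms ]" = true
    · rw [if_pos h1, ih, pvClassifyB_H ln h1, pvCountS]
      simp
    · rw [Bool.not_eq_true] at h1
      rw [if_neg (by rw [h1]; simp)]
      by_cases h2 : (PySem.Str.startswith (PySem.Str.strip ln) "[" && PySem.Str.isIn "]" (PySem.Str.strip ln)) = true
      · rw [if_pos (by rw [h2, h1]; decide), pvClassifyB_S ln h1 h2, pvCountS]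
        simp
      · rw [Bool.not_eq_true] at h2
        rw [if_neg (by rw [h2]; simp), if_pos trivial]
        by_cases h3 : (PySem.Str.strip ln == "" || PySem.Str.startswith (PySem.Str.strip ln) ";") = true
        · rw [if_pos h3, ih, pvClassifyB_O_skip ln h1 h2 h3, pvCountS]
          simp
        · rw [Bool.not_eq_true] at h3
          rw [if_neg (by rw [h3]; simp)]
          cases hg : PySem.List.pyGet? (PySem.Str.split₀ (PySem.Str.strip ln)) 0 with
          | none =>
            simp only []
            rw [ih, pvClassifyB_tok ln 'O' h1 h2 h3 (by rw [hg]; rfl), pvCountS]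
            simp
          | some p0 =>
            simp only []
            cases ho : PySem.Int.ofStr? p0 with
            | none =>
              simp only []
              rw [ih, pvClassifyB_tok ln 'O' h1 h2 h3 (by rw [hg]; simp [ho]), pvCountS]
              simp
            | some v =>
              simp only []
              rw [ih, pvClassifyB_tok ln 'A' h1 h2 h3 (by rw [hg]; simp [ho]), pvCountS]
              simp
              ring

-- before the header, A's loop scans for the first 'H' tag, then counts to the first 'S'
theorem pvLoopA_false (l : List String) : ∀ n : Int,
    pvLoopA l n false = n + (match PySem.List.index? (l.map pvClassifyB) 'H' with
                             | none => 0
                             | some h => pvCountS ((l.map pvClassifyB).drop (h + 1))) := by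
  induction l with
  | nil => intro n; simp [pvLoopA, PySem.List.index?_eq_idxOf?]
  | cons ln rest ih =>
    intro n
    rw [List.map_cons]
    simp only [pvLoopA, Bool.false_and, Bool.false_eq_true, if_false]
    by_cases h1 : PySem.Str.startswith (PySem.Str.lower (PySem.Str.strip ln)) "[ atoms ]" = true
    · rw [if_pos h1, pvClassifyB_H ln h1, PySem.List.index?_cons_self, pvLoopA_true]
      simp
    · rw [Bool.not_eq_true] at h1
      have hcl : pvClassifyB ln ≠ 'H' := by
        simp only [pvClassifyB]
        rw [if_neg (by rw [h1]; simp)]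
        (repeat' split) <;> decide
      rw [if_neg (by rw [h1]; simp), PySem.List.index?_cons_of_ne _ hcl]
      have ih' := ih n
      cases hi : PySem.List.index? (rest.map pvClassifyB) 'H' with
      | none => rw [hi] at ih'; simpa [hi] using ih'
      | some k => rw [hi] at ih'; simpa [hi] using ih'

-- ===== VERDICT (by name: the statement is the Claim_ definition above) =====
theorem count_atoms_in_block_spec : Claim_equal_count_atoms_in_block := by
  intro bl _
  unfold Spec_count_atoms_in_block count_atoms_in_block count_atoms_in_block_alt
  rw [pvLoopA_false]
  cases hH : PySem.List.index? (bl.map pvClassifyB) 'H' with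
  | none => simp only [hH]; norm_num
  | some h =>
    simp only [hH]
    rw [show ((h : Nat) + 1 : Int) = (((h + 1 : Nat) : Nat) : Int) by push_cast; ring]
    rw [PySem.List.slice_from_natCast (bl.map pvClassifyB) (h + 1)]
    rw [zero_add]
    exact (pvBody_eq _).symm
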